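-- pv_equiv track=rewrite | github.com/thuva4/am-i-bad-trader | scripts/fetch_market_data.py | split_multi_exchange_tickers
-- ===== SOURCE A (Python) =====
-- CURRENCY_SUFFIX = {
--     "USD": "",
--     "GBP": ".L",
--     "GBX": ".L",
--     "CAD": ".TO",
--     "CHF": ".SW",
-- }
--
-- ISIN_PREFIX_TO_SUFFIX = {
--     "FR": ".PA",
--     "DE": ".DE",
--     "NL": ".AS",
--     "ES": ".MC",
--     "BE": ".BR",
--     "IT": ".MI",
--     "CH": ".SW",
--     "IE": ".L",   # Irish-domiciled ETFs often trade on LSE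
--     "GB": ".L",
-- }
--
-- def resolve_yahoo_symbol(ticker, currency, isin):
--     """Map a Trading 212 ticker to a Yahoo Finance symbol using currency and ISIN."""
--     if not ticker:
--         return ticker
--
--     # USD tickers work as-is on Yahoo Finance
--     if currency == "USD":
--         return ticker
--
--     # Handle special characters (BT/A → BT-A)
--     yahoo_ticker = ticker.replace("/", "-")
--
--     # Try ISIN prefix mapping first (most reliable for EUR tickers)
--     if isin and len(isin) >= 2:
--         prefix = isin[:2]
--         suffix = ISIN_PREFIX_TO_SUFFIX.get(prefix)
--         if suffix:
--             return f"{yahoo_ticker}{suffix}"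
--
--     # Fall back to currency-based suffix
--     suffix = CURRENCY_SUFFIX.get(currency, "")
--     if suffix:
--         return f"{yahoo_ticker}{suffix}"
--
--     return yahoo_ticker
--
-- def split_multi_exchange_tickers(actions):
--     """Split tickers traded on multiple exchanges into separate tickers.
--
--     When the same ticker (e.g., CNQ) has trades in different currencies
--     (USD on NYSE, CAD on TSX), rename each action's ticker to the resolved
--     Yahoo symbol so they are treated as separate positions.
--
--     Returns the number of renamed actions.
--     """
--     # Find tickers with multiple trade currencies
--     ticker_currencies = {}
--     for a in actions:
--         ticker = a.get("ticker", "")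
--         if not ticker:
--             continue
--         tc = a.get("trade_currency", "") or a.get("currency", "")
--         if tc and a["action"] in ("BUY", "SELL"):
--             if ticker not in ticker_currencies:
--                 ticker_currencies[ticker] = set()
--             ticker_currencies[ticker].add(tc)
--
--     multi = {t for t, cs in ticker_currencies.items() if len(cs) > 1}
--     if not multi:
--         return 0
--
--     renamed = 0
--     for a in actions:
--         ticker = a.get("ticker", "")
--         if ticker not in multi:
--             continue
--         tc = a.get("trade_currency", "") or a.get("currency", "")
--         isin = a.get("isin", "")
--         yahoo_sym = resolve_yahoo_symbol(ticker, tc, isin)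
--         if yahoo_sym != ticker:
--             a["ticker_original"] = ticker
--             a["ticker"] = yahoo_sym
--             renamed += 1
--
--     return renamed
-- ===== SOURCE B (Python) =====
-- # Alternative implementation: one flat set of distinct (ticker, currency) pairs,
-- # multi-currency tickers found by an existential scan over that set (instead of
-- # a dict of per-ticker currency sets filtered by size).  Return value only; like
-- # A, the rename pass mutates the action dicts in place.
--
-- CURRENCY_SUFFIX = {
--     "USD": "",
--     "GBP": ".L",
--     "GBX": ".L",
--     "CAD": ".TO",
--     "CHF": ".SW",
-- }
--
-- ISIN_PREFIX_TO_SUFFIX = {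
--     "FR": ".PA",
--     "DE": ".DE",
--     "NL": ".AS",
--     "ES": ".MC",
--     "BE": ".BR",
--     "IT": ".MI",
--     "CH": ".SW",
--     "IE": ".L",
--     "GB": ".L",
-- }
--
-- def _resolve(ticker, currency, isin):
--     if not ticker or currency == "USD":
--         return ticker
--     base = ticker.replace("/", "-")
--     suffix = ISIN_PREFIX_TO_SUFFIX.get(isin[:2], "") if len(isin) >= 2 else ""
--     if not suffix:
--         suffix = CURRENCY_SUFFIX.get(currency, "")
--     return base + suffix
--
-- def split_multi_exchange_tickers(actions):
--     pairs = set()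
--     for a in actions:
--         t = a.get("ticker", "")
--         tc = a.get("trade_currency", "") or a.get("currency", "")
--         if t and tc and a["action"] in ("BUY", "SELL"):
--             pairs.add((t, tc))
--     multi = {t for (t, c) in pairs if any(u == t and d != c for (u, d) in pairs)}
--     renamed = 0
--     for a in actions:
--         t = a.get("ticker", "")
--         if t in multi:
--             sym = _resolve(t, a.get("trade_currency", "") or a.get("currency", ""), a.get("isin", ""))
--             if sym != t:
--                 a["ticker_original"] = t
--                 a["ticker"] = sym
--                 renamed += 1
--     return renamed
-- ===== Notes on version B (the rewrite author's own statement) =====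
-- stated objective: alternative
-- what changed: Replaces the dict of per-ticker currency sets filtered by len>1 with one flat set of distinct (ticker, currency) pairs in which multi-currency tickers are found by an existential scan, drops the early return, and rewrites the symbol resolver as a single suffix computation instead of an early-return chain.
-- outside the precondition, e.g. on split_multi_exchange_tickers([{'ticker': 'T', 'currency': 'EUR'}]): A raises KeyError, B raises KeyError
import Mathlib
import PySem

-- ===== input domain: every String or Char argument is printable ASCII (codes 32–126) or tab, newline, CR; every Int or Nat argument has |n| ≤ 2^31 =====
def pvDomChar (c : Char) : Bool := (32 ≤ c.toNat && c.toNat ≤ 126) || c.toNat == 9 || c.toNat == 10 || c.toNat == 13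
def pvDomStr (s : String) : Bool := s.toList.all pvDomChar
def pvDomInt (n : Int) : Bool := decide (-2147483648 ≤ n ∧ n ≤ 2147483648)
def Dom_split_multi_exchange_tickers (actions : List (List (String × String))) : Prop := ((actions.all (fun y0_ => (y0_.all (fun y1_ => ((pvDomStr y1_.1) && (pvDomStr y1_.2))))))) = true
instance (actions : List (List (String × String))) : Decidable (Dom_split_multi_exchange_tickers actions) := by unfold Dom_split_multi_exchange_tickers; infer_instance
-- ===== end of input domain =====

-- B finds multi-currency tickers with one flat set of distinct (ticker, currency) pairs scanned
-- existentially instead of A's dict of per-ticker currency sets filtered by size (objective: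
-- alternative). Equivalence is about the RETURN value; the Python B performs the same in-place
-- renaming of the action dicts as A.

-- ===== PORT A =====
-- module constants (shared by both Pythons)
def CURRENCY_SUFFIX : PySem.Dict String String :=
  PySem.Dict.ofList [("USD", ""), ("GBP", ".L"), ("GBX", ".L"), ("CAD", ".TO"), ("CHF", ".SW")]

def ISIN_PREFIX_TO_SUFFIX : PySem.Dict String String :=
  PySem.Dict.ofList [("FR", ".PA"), ("DE", ".DE"), ("NL", ".AS"), ("ES", ".MC"), ("BE", ".BR"),
                     ("IT", ".MI"), ("CH", ".SW"), ("IE", ".L"), ("GB", ".L")]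

-- a.get(k, "") on an action dict (the same primitive call in both Pythons)
def pvGet (a : List (String × String)) (k : String) : String :=
  (PySem.Dict.mk a).getD k ""

-- a.get("trade_currency", "") or a.get("currency", "")  (the same expression in both Pythons)
def pvTC (a : List (String × String)) : String :=
  let t := pvGet a "trade_currency"
  if t ≠ "" then t else pvGet a "currency"

def resolve_yahoo_symbol (ticker currency isin : String) : String :=
  if ticker = "" then ticker
  else if currency = "USD" then ticker
  else
    let yahoo := PySem.Str.replace ticker "/" "-"
    -- code after the ISIN branch: currency-based suffix, then bare ticker
    let fallback :=
      let s := CURRENCY_SUFFIX.getD currency ""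
      if s ≠ "" then yahoo ++ s else yahoo
    if isin ≠ "" ∧ 2 ≤ PySem.Str.len isin then
      match ISIN_PREFIX_TO_SUFFIX.get? (PySem.Str.slice isin none (some 2)) with
      | some s => if s ≠ "" then yahoo ++ s else fallback   -- `if suffix:` on the dict.get result
      | none => fallback
    else fallback

-- first pass: `a["action"]` is read via getD ""; Pre_ guarantees the key is present wherever the
-- Python reads it (it raises KeyError there), so the default is never consulted on admitted inputs
def pvTickerCurrencies (actions : List (List (String × String))) :
    PySem.Dict String (PySem.Set String) :=
  actions.foldl (fun d a =>
    let ticker := pvGet a "ticker"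
    if ticker = "" then d
    else
      let tc := pvTC a
      if tc ≠ "" ∧ (pvGet a "action" = "BUY" ∨ pvGet a "action" = "SELL") then
        -- `if ticker not in d: d[ticker] = set()` followed by `d[ticker].add(tc)`
        d.modify ticker PySem.Set.empty (fun s => PySem.Set.add s tc)
      else d) PySem.Dict.empty

-- multi = {t for t, cs in ticker_currencies.items() if len(cs) > 1}
def pvMultiA (actions : List (List (String × String))) : PySem.Set String :=
  (pvTickerCurrencies actions).items.foldl
    (fun m p => if 1 < p.2.length then PySem.Set.add m p.1 else m) PySem.Set.empty

def split_multi_exchange_tickers (actions : List (List (String × String))) : Int :=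
  if (pvMultiA actions).isEmpty then 0
  else
    actions.foldl (fun renamed a =>
      let ticker := pvGet a "ticker"
      if ¬ (PySem.Set.contains (pvMultiA actions) ticker = true) then renamed
      else
        let tc := pvTC a
        let isin := pvGet a "isin"
        let yahoo_sym := resolve_yahoo_symbol ticker tc isin
        if yahoo_sym ≠ ticker then renamed + 1 else renamed) 0

-- ===== PORT B =====
def resolve_alt (ticker currency isin : String) : String :=
  if ticker = "" ∨ currency = "USD" then ticker
  else
    let base := PySem.Str.replace ticker "/" "-"
    let suffix0 :=
      if 2 ≤ PySem.Str.len isin then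
        ISIN_PREFIX_TO_SUFFIX.getD (PySem.Str.slice isin none (some 2)) ""
      else ""
    let suffix := if suffix0 = "" then CURRENCY_SUFFIX.getD currency "" else suffix0
    base ++ suffix

-- the flat set of distinct (ticker, trade-currency) pairs of qualifying actions
def pvPairs (actions : List (List (String × String))) : PySem.Set (String × String) :=
  actions.foldl (fun ps a =>
    let t := pvGet a "ticker"
    let tc := pvTC a
    if t ≠ "" ∧ tc ≠ "" ∧ (pvGet a "action" = "BUY" ∨ pvGet a "action" = "SELL") then
      PySem.Set.add ps (t, tc)
    else ps) PySem.Set.empty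

-- multi = {t for (t, c) in pairs if any(u == t and d != c for (u, d) in pairs)}
def pvMultiB (actions : List (List (String × String))) : PySem.Set String :=
  (pvPairs actions).foldl (fun m p =>
    if (pvPairs actions).any (fun q => q.1 == p.1 && q.2 != p.2) then PySem.Set.add m p.1 else m)
    PySem.Set.empty

def split_multi_exchange_tickers_alt (actions : List (List (String × String))) : Int :=
  actions.foldl (fun renamed a =>
    let t := pvGet a "ticker"
    if PySem.Set.contains (pvMultiB actions) t = true then
      let sym := resolve_alt t (pvTC a) (pvGet a "isin")
      if sym ≠ t then renamed + 1 else renamed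
    else renamed) 0

-- ===== PRECONDITION & SPEC =====
-- Pre_ excludes exactly the inputs on which A raises KeyError: an action whose ticker and trade
-- currency are both truthy but which has no "action" key.
def Pre_split_multi_exchange_tickers (actions : List (List (String × String))) : Prop :=
  ∀ a ∈ actions,
    pvGet a "ticker" = "" ∨ pvTC a = "" ∨ (PySem.Dict.mk a).contains "action" = true

instance (actions : List (List (String × String))) : Decidable (Pre_split_multi_exchange_tickers actions) := by
  unfold Pre_split_multi_exchange_tickers; infer_instance

def pvWitness_split_multi_exchange_tickers : (List (List (String × String))) :=
  [[("ticker", "CNQ"), ("action", "BUY"), ("currency", "USD")],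
   [("ticker", "CNQ"), ("action", "SELL"), ("trade_currency", "CAD"), ("isin", "CA123")]]

def Spec_split_multi_exchange_tickers (actions : List (List (String × String))) (out : Int) : Prop := out = split_multi_exchange_tickers_alt actions
instance (actions : List (List (String × String))) (out : Int) : Decidable (Spec_split_multi_exchange_tickers actions out) := by unfold Spec_split_multi_exchange_tickers; infer_instance

-- ===== CLAIM (what is proved, stated in full; the proofs are below) =====
def Claim_equal_split_multi_exchange_tickers : Prop := ∀ (actions : List (List (String × String))), Dom_split_multi_exchange_tickers actions → Pre_split_multi_exchange_tickers actions → Spec_split_multi_exchange_tickers actions (split_multi_exchange_tickers actions)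

-- ===== LEMMAS AND PROOFS =====

-- the common qualifying test of the two first passes, as one Bool
def pvQual (a : List (String × String)) : Bool :=
  decide (pvGet a "ticker" ≠ "" ∧ pvTC a ≠ "" ∧
    (pvGet a "action" = "BUY" ∨ pvGet a "action" = "SELL"))

-- the (ticker, currency) pairs of the qualifying actions, in order, with duplicates
def pvL (actions : List (List (String × String))) : List (String × String) :=
  (actions.filter pvQual).map (fun a => (pvGet a "ticker", pvTC a))

-- A's first pass is the canonical modify-fold over pvL
theorem pvTickerCurrencies_eq (actions : List (List (String × String))) :
    pvTickerCurrencies actions =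
      (pvL actions).foldl
        (fun d p => d.modify p.1 PySem.Set.empty (fun s => PySem.Set.add s p.2))
        PySem.Dict.empty := by
  unfold pvTickerCurrencies pvL
  rw [List.foldl_map]
  have hstep := PySem.List.foldl_congr_mem actions
    (fun (d : PySem.Dict String (PySem.Set String)) a =>
      let ticker := pvGet a "ticker"
      if ticker = "" then d
      else
        let tc := pvTC a
        if tc ≠ "" ∧ (pvGet a "action" = "BUY" ∨ pvGet a "action" = "SELL") then
          d.modify ticker PySem.Set.empty (fun s => PySem.Set.add s tc)
        else d)
    (fun d a =>
      if pvQual a then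
        d.modify (pvGet a "ticker") PySem.Set.empty (fun s => PySem.Set.add s (pvTC a))
      else d)
    PySem.Dict.empty
    (by
      intro d a _
      by_cases h1 : pvGet a "ticker" = "" <;>
        by_cases h2 : pvTC a ≠ "" ∧ (pvGet a "action" = "BUY" ∨ pvGet a "action" = "SELL") <;>
          simp [pvQual, h1, h2])
  rw [hstep, PySem.List.foldl_if_eq_foldl_filter]

-- B's first pass builds exactly set(pvL)
theorem pvPairs_eq (actions : List (List (String × String))) :
    pvPairs actions = PySem.Set.ofList (pvL actions) := by
  unfold pvPairs pvL
  rw [PySem.Set.ofList_eq_foldl, List.foldl_map]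
  have hstep := PySem.List.foldl_congr_mem actions
    (fun (ps : PySem.Set (String × String)) a =>
      let t := pvGet a "ticker"
      let tc := pvTC a
      if t ≠ "" ∧ tc ≠ "" ∧ (pvGet a "action" = "BUY" ∨ pvGet a "action" = "SELL") then
        PySem.Set.add ps (t, tc)
      else ps)
    (fun ps a =>
      if pvQual a then PySem.Set.add ps (pvGet a "ticker", pvTC a) else ps)
    PySem.Set.empty
    (by
      intro ps a _
      by_cases h : pvGet a "ticker" ≠ "" ∧ pvTC a ≠ "" ∧
          (pvGet a "action" = "BUY" ∨ pvGet a "action" = "SELL") <;>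
        simp [pvQual, h])
  rw [hstep, PySem.List.foldl_if_eq_foldl_filter]
  rfl

-- the per-ticker set stored by the modify-fold, characterised
theorem getD_modify_fold (l : List (String × String))
    (d : PySem.Dict String (PySem.Set String)) (t : String) :
    ((l.foldl (fun d p => d.modify p.1 PySem.Set.empty (fun s => PySem.Set.add s p.2)) d).getD
        t PySem.Set.empty)
      = ((l.filter (fun p => p.1 == t)).map Prod.snd).foldl PySem.Set.add
          (d.getD t PySem.Set.empty) := by
  induction l generalizing d with
  | nil => rfl
  | cons p rest ih =>
    simp only [List.foldl_cons, ih, List.filter_cons]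
    by_cases hp : p.1 = t
    · subst hp
      simp [PySem.Dict.getD_modify_self]
    · rw [PySem.Dict.getD_modify_of_ne _ _ _ (fun h => hp h.symm)]
      simp [hp]

theorem mem_map_snd_filter (t c : String) (l : List (String × String)) :
    (c ∈ (l.filter (fun p => p.1 == t)).map Prod.snd) ↔ (t, c) ∈ l := by
  simp only [List.mem_map, List.mem_filter, beq_iff_eq]
  constructor
  · rintro ⟨⟨p1, p2⟩, ⟨hm, h1⟩, h2⟩
    simp only at h1 h2; subst h1; subst h2; exact hm
  · intro h; exact ⟨(t, c), ⟨h, rfl⟩, rfl⟩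

theorem getD_tcur (actions : List (List (String × String))) (t : String) :
    (pvTickerCurrencies actions).getD t PySem.Set.empty
      = PySem.Set.ofList (((pvL actions).filter (fun p => p.1 == t)).map Prod.snd) := by
  rw [pvTickerCurrencies_eq, getD_modify_fold, PySem.Set.ofList_eq_foldl]
  rfl

-- membership in a conditional Set.add fold
theorem mem_foldl_add_if {α : Type} (c : α → Prop) [DecidablePred c] (f : α → String)
    (l : List α) (s : PySem.Set String) (x : String) :
    (x ∈ l.foldl (fun m p => if c p then PySem.Set.add m (f p) else m) s)
      ↔ x ∈ s ∨ ∃ p ∈ l, c p ∧ f p = x := by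
  induction l generalizing s with
  | nil => simp
  | cons p rest ih =>
    by_cases hc : c p <;> simp [hc, ih, PySem.Set.mem_add] <;> tauto

-- two distinct members iff length > 1, on a Nodup list
theorem one_lt_length_iff (l : List String) (h : l.Nodup) :
    1 < l.length ↔ ∃ a b, a ∈ l ∧ b ∈ l ∧ a ≠ b := by
  constructor
  · intro hlen
    match l, hlen with
    | a :: b :: t, _ =>
      refine ⟨a, b, by simp, by simp, ?_⟩
      simp only [List.nodup_cons, List.mem_cons] at h
      exact fun e => h.1 (Or.inl e)
  · rintro ⟨a, b, ha, hb, hne⟩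
    match l, ha, hb with
    | [x], ha, hb =>
      simp only [List.mem_singleton] at ha hb
      exact absurd (ha.trans hb.symm) hne
    | _ :: _ :: _, _, _ => simp

theorem keys_nodup_tcur (actions : List (List (String × String))) :
    (pvTickerCurrencies actions).keys.Nodup := by
  rw [pvTickerCurrencies_eq]
  exact PySem.Dict.nodup_keys_foldl_modify_key (pvL actions) Prod.fst PySem.Set.empty
    (fun _ p => fun s => PySem.Set.add s p.2) PySem.Dict.empty PySem.Dict.nodup_keys_empty

theorem mem_multiA (actions : List (List (String × String))) (t : String) :
    t ∈ pvMultiA actions ↔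
      1 < ((pvTickerCurrencies actions).getD t PySem.Set.empty).length := by
  unfold pvMultiA
  rw [mem_foldl_add_if (c := fun p : String × PySem.Set String => 1 < p.2.length)
        (f := Prod.fst)]
  simp only [PySem.Set.empty, List.not_mem_nil, false_or]
  constructor
  · rintro ⟨⟨k, v⟩, hp, hlen, rfl⟩
    rwa [PySem.Dict.getD_of_mem_items _ hp (keys_nodup_tcur actions)]
  · intro hlen
    by_cases hc : (pvTickerCurrencies actions).contains t = true
    · have hk : t ∈ (pvTickerCurrencies actions).keys :=
        (PySem.Dict.contains_iff_mem_keys _ _).mp hc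
      simp only [PySem.Dict.keys, List.mem_map] at hk
      obtain ⟨⟨k, v⟩, hp, h1⟩ := hk
      simp only at h1
      subst h1
      refine ⟨(k, v), hp, ?_, rfl⟩
      rwa [PySem.Dict.getD_of_mem_items _ hp (keys_nodup_tcur actions)] at hlen
    · rw [PySem.Dict.getD_of_not_contains _ _ (by simpa using hc)] at hlen
      simp at hlen

theorem mem_multiA_iff_pairs (actions : List (List (String × String))) (t : String) :
    t ∈ pvMultiA actions ↔
      ∃ c d, (t, c) ∈ pvL actions ∧ (t, d) ∈ pvL actions ∧ c ≠ d := by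
  rw [mem_multiA, getD_tcur]
  rw [one_lt_length_iff _ (PySem.Set.nodup_ofList _)]
  constructor
  · rintro ⟨a, b, ha, hb, hne⟩
    rw [PySem.Set.mem_ofList, mem_map_snd_filter] at ha hb
    exact ⟨a, b, ha, hb, hne⟩
  · rintro ⟨c, d, hc, hd, hne⟩
    refine ⟨c, d, ?_, ?_, hne⟩ <;>
      rw [PySem.Set.mem_ofList, mem_map_snd_filter] <;> assumption

theorem mem_multiB_iff_pairs (actions : List (List (String × String))) (t : String) :
    t ∈ pvMultiB actions ↔
      ∃ c d, (t, c) ∈ pvL actions ∧ (t, d) ∈ pvL actions ∧ c ≠ d := by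
  unfold pvMultiB
  rw [mem_foldl_add_if
        (c := fun p : String × String =>
          ((pvPairs actions).any (fun q => q.1 == p.1 && q.2 != p.2)) = true)
        (f := Prod.fst)]
  simp only [PySem.Set.empty, List.not_mem_nil, false_or]
  constructor
  · rintro ⟨⟨pt, pc⟩, hp, hany, rfl⟩
    rw [pvPairs_eq, PySem.Set.mem_ofList] at hp
    simp only [List.any_eq_true, beq_iff_eq, bne_iff_ne, Bool.and_eq_true, ne_eq] at hany
    obtain ⟨q, hq, hq1, hq2⟩ := hany
    rw [pvPairs_eq, PySem.Set.mem_ofList] at hq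
    refine ⟨pc, q.2, hp, ?_, fun e => hq2 e.symm⟩
    rw [← hq1]
    exact hq
  · rintro ⟨c, d, hc, hd, hne⟩
    refine ⟨(t, c), by rw [pvPairs_eq, PySem.Set.mem_ofList]; exact hc, ?_, rfl⟩
    simp only [List.any_eq_true, Bool.and_eq_true, beq_iff_eq, bne_iff_ne, ne_eq]
    exact ⟨(t, d), by rw [pvPairs_eq, PySem.Set.mem_ofList]; exact hd, rfl,
      fun e => hne e.symm⟩

-- the two resolvers agree everywhere
theorem resolve_eq (ticker currency isin : String) :
    resolve_yahoo_symbol ticker currency isin = resolve_alt ticker currency isin := by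
  unfold resolve_yahoo_symbol resolve_alt
  by_cases h1 : ticker = ""
  · simp [h1]
  · by_cases h2 : currency = "USD"
    · simp [h1, h2]
    · by_cases hlen : 2 ≤ PySem.Str.len isin
      · have hne : isin ≠ "" := by
          intro h; rw [h] at hlen; exact absurd hlen (by decide)
        have hlen' : 2 ≤ isin.length := by simpa using hlen
        have hlen1 : ¬ isin.length ≤ 1 := by omega
        cases hg : ISIN_PREFIX_TO_SUFFIX.get? (PySem.Str.slice isin none (some 2)) with
        | none =>
          have hgd : ISIN_PREFIX_TO_SUFFIX.getD (PySem.Str.slice isin none (some 2)) "" = "" := by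
            rw [PySem.Dict.getD_eq_get?_getD, hg]; rfl
          by_cases hc : CURRENCY_SUFFIX.getD currency "" = "" <;>
            simp [h1, h2, hne, hlen', hgd, hc, String.append_empty]
        | some s =>
          have hgd : ISIN_PREFIX_TO_SUFFIX.getD (PySem.Str.slice isin none (some 2)) "" = s := by
            rw [PySem.Dict.getD_eq_get?_getD, hg]; rfl
          by_cases hs : s = ""
          · subst hs
            by_cases hc : CURRENCY_SUFFIX.getD currency "" = "" <;>
              simp [h1, h2, hne, hlen', hgd, hc, String.append_empty]
          · simp [h1, h2, hne, hlen', hgd, hs]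
      · have hlen'' : ¬ 2 ≤ isin.length := by simpa using hlen
        by_cases hc : CURRENCY_SUFFIX.getD currency "" = "" <;>
          simp [h1, h2, hlen'', hc, String.append_empty]

-- ===== VERDICT (by name: the statement is the Claim_ definition above) =====
theorem split_multi_exchange_tickers_spec : Claim_equal_split_multi_exchange_tickers := by
  intro actions _ _
  unfold Spec_split_multi_exchange_tickers
  unfold split_multi_exchange_tickers
  by_cases hE : (pvMultiA actions).isEmpty = true
  · have hA0 : pvMultiA actions = [] := List.isEmpty_iff.mp hE
    have hmtB : ∀ x, ¬ x ∈ pvMultiB actions := by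
      intro x h
      have hx := (mem_multiA_iff_pairs actions x).mpr ((mem_multiB_iff_pairs actions x).mp h)
      rw [hA0] at hx
      simp at hx
    have h0 : split_multi_exchange_tickers_alt actions = 0 := by
      unfold split_multi_exchange_tickers_alt
      have hstep := PySem.List.foldl_congr_mem actions
        (fun (renamed : Int) (a : List (String × String)) =>
          let t := pvGet a "ticker"
          if PySem.Set.contains (pvMultiB actions) t = true then
            let sym := resolve_alt t (pvTC a) (pvGet a "isin")
            if sym ≠ t then renamed + 1 else renamed
          else renamed)
        (fun (acc : Int) (_ : List (String × String)) => acc)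
        0
        (by intro r a _; simp [hmtB])
      rw [hstep, PySem.List.foldl_ignore]
    rw [if_pos hE, h0]
  · rw [if_neg hE]
    unfold split_multi_exchange_tickers_alt
    apply PySem.List.foldl_congr_mem
    intro r a _
    have hAB := (mem_multiA_iff_pairs actions (pvGet a "ticker")).trans
      (mem_multiB_iff_pairs actions (pvGet a "ticker")).symm
    by_cases hm : pvGet a "ticker" ∈ pvMultiB actions
    · simp [hm, hAB.mpr hm, resolve_eq]
    · have hmA : pvGet a "ticker" ∉ pvMultiA actions := fun h => hm (hAB.mp h)
      simp [hm, hmA]
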